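-- pv_equiv track=rewrite | github.com/ivokund/advent-of-code-2024 | day12/main.py | part2
-- ===== SOURCE A (Python) =====
-- from collections import namedtuple
--
-- Point = namedtuple("Point", ["x", "y"])
--
-- Region = namedtuple("Region", ["plant", "points"])
--
-- directions = [(-1, 0), (1, 0), (0, -1), (0, 1)]
--
-- def find_regions(text):
--     cols_by_rows = [list(row) for row in text.split("\n")]
--
--     plants_by_points = {}
--
--     for y in range(len(cols_by_rows)):
--         for x in range(len(cols_by_rows[y])):
--             plant = cols_by_rows[y][x]
--             point = Point(x, y)
--             plants_by_points[point] = plant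
--
--     unassigned_queue = list(plants_by_points.keys())
--     regions = []
--     visited = set()
--
--     def dfs_collect_region(point, region, level=0):
--         visited.add(point)
--         if (point.x, point.y) in unassigned_queue:
--             unassigned_queue.remove((point.x, point.y))
--         region.points.add(point)
--         val = plants_by_points.get(point)
--         for dx, dy in directions:
--             if dx == 0 and dy == 0:
--                 continue
--             new_point = Point(point.x + dx, point.y + dy)
--             new_val = plants_by_points.get(new_point, None)
--             if new_val is not None and new_point not in visited:
--                 if new_val == val:
--                     dfs_collect_region(new_point, region, level + 1)
--
--     while unassigned_queue:
--         region = Region(plants_by_points.get(unassigned_queue[0]), set())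
--         regions.append(region)
--         dfs_collect_region(unassigned_queue[0], region)
--     return regions, plants_by_points
--
-- def part2(text):
--     regions, plants_by_points = find_regions(text)
--
--     def count_corners(region):
--         corners = 0
--
--         for x, y in region.points:
--             pairs = [
--                 ((0, 1), (1, 0)),  # up, right
--                 ((1, 0), (0, -1)),  # right, down
--                 ((0, -1), (-1, 0)),  # down, left
--                 ((-1, 0), (0, 1))  # left, up
--             ]
--             for d1, d2 in pairs:
--                 first_in = (x + d1[0], y + d1[1]) in region.points
--                 second_in = (x + d2[0], y + d2[1]) in region.points
--
--                 is_outside_corner = (not first_in and not second_in)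
--
--                 diagonal = (x + d1[0] + d2[0], y + d1[1] + d2[1])
--                 is_inside_corner = first_in and second_in and diagonal not in region.points
--
--                 if is_outside_corner or is_inside_corner:
--                     corners += 1
--         return corners
--
--     def get_region_price(region):
--         area = len(region.points)
--         corner_count = count_corners(region)
--         return area * corner_count
--
--     return sum([get_region_price(region) for region in regions])
-- ===== SOURCE B (Python) =====
-- def count_corners(pts):
--     pairs = (((0, 1), (1, 0)), ((1, 0), (0, -1)), ((0, -1), (-1, 0)), ((-1, 0), (0, 1)))
--     corners = 0
--     for x, y in pts:
--         for d1, d2 in pairs: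
--             first_in = (x + d1[0], y + d1[1]) in pts
--             second_in = (x + d2[0], y + d2[1]) in pts
--             if first_in and second_in:
--                 if (x + d1[0] + d2[0], y + d1[1] + d2[1]) not in pts:
--                     corners += 1
--             elif not first_in and not second_in:
--                 corners += 1
--     return corners
--
--
-- def part2(text):
--     plants = {}
--     for y, row in enumerate(text.split("\n")):
--         for x, ch in enumerate(row):
--             plants[(x, y)] = ch
--     visited = set()
--     total = 0
--     for start in plants:
--         if start in visited:
--             continue
--         plant = plants[start]
--         visited.add(start)
--         stack = [start]
--         pts = set()
--         while stack:
--             x, y = stack.pop()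
--             pts.add((x, y))
--             for nb in ((x - 1, y), (x + 1, y), (x, y - 1), (x, y + 1)):
--                 if nb not in visited and plants.get(nb) == plant:
--                     visited.add(nb)
--                     stack.append(nb)
--         total += len(pts) * count_corners(pts)
--     return total
-- ===== Notes on version B (the rewrite author's own statement) =====
-- stated objective: faster
-- what changed: Recursive DFS over a Region namedtuple plus an unassigned_queue list with O(n) remove-per-cell is replaced by an iterative mark-at-push stack flood fill that scans the dict keys directly and accumulates the total inline.
import Mathlib
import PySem

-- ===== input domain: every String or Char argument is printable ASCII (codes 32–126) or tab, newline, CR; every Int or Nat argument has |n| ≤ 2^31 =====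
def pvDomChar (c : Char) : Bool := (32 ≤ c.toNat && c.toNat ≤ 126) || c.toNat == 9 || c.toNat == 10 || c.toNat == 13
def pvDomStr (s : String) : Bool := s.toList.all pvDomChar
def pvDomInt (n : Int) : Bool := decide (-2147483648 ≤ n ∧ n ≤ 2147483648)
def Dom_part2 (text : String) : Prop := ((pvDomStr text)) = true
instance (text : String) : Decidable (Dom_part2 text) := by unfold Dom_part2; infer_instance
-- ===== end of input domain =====

-- B replaces A's recursive DFS + O(n)-remove unassigned_queue with an iterative mark-at-push
-- stack flood fill scanning the dict keys, accumulating the total inline (measurably faster).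

-- ===== PORT A =====
-- module constant `directions`
def pvDirectionsA : List (Int × Int) := [(-1, 0), (1, 0), (0, -1), (0, 1)]

-- the double loop of find_regions building plants_by_points (indices always in range,
-- so pyGetD is exact here)
def pvPlantsOfGridA (grid : List (List Char)) : PySem.Dict (Int × Int) Char :=
  (PySem.List.pyRange 0 (PySem.List.len grid) 1).foldl (fun d y =>
    (PySem.List.pyRange 0 (PySem.List.len (PySem.List.pyGetD grid y [])) 1).foldl (fun d x =>
      let plant := PySem.List.pyGetD (PySem.List.pyGetD grid y []) x ' '
      d.insert (x, y) plant) d) PySem.Dict.empty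

-- dfs_collect_region; state = (visited, unassigned_queue, region.points); fuel bounds the
-- recursion depth (each call is on a fresh unvisited dict key, so keys+1 never runs out);
-- the unused `level` parameter of the Python is dropped
def pvDfsA (pl : PySem.Dict (Int × Int) Char) :
    Nat → (Int × Int) →
    PySem.Set (Int × Int) × List (Int × Int) × PySem.Set (Int × Int) →
    PySem.Set (Int × Int) × List (Int × Int) × PySem.Set (Int × Int)
  | 0, _, st => st
  | fuel + 1, point, (vis, queue, reg) =>
    let vis := PySem.Set.add vis point
    let queue := if queue.contains point then (PySem.List.remove? queue point).getD queue else queue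
    let reg := PySem.Set.add reg point
    let val := pl.get? point
    pvDirectionsA.foldl
      (fun st d =>
        if d.1 == 0 && d.2 == 0 then st
        else
          let newPoint := (point.1 + d.1, point.2 + d.2)
          let newVal := pl.get? newPoint
          if newVal.isSome && !(PySem.Set.contains st.1 newPoint) then
            if newVal == val then pvDfsA pl fuel newPoint st else st
          else st)
      (vis, queue, reg)

-- the `while unassigned_queue:` loop; fuel = initial queue length (each iteration removes
-- at least the start point from the queue, so it never runs out)
def pvLoopA (pl : PySem.Dict (Int × Int) Char) :
    Nat → PySem.Set (Int × Int) → List (Int × Int) →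
    List (Option Char × PySem.Set (Int × Int)) → List (Option Char × PySem.Set (Int × Int))
  | 0, _, _, regs => regs
  | fuel + 1, vis, queue, regs =>
    match queue with
    | [] => regs
    | q0 :: _ =>
      let st := pvDfsA pl (pl.keys.length + 1) q0 (vis, queue, PySem.Set.empty)
      pvLoopA pl fuel st.1 st.2.1 (regs ++ [(pl.get? q0, st.2.2)])

def pvFindRegionsA (text : String) :
    List (Option Char × PySem.Set (Int × Int)) × PySem.Dict (Int × Int) Char :=
  -- text.split("\n"), each row then viewed as its character list (list(row))
  let colsByRows := PySem.Chars.splitOn text.toList ['\n']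
  let pl := pvPlantsOfGridA colsByRows
  let queue := pl.keys
  (pvLoopA pl queue.length PySem.Set.empty queue [], pl)

-- `pairs` of count_corners
def pvPairsA : List ((Int × Int) × (Int × Int)) :=
  [((0, 1), (1, 0)), ((1, 0), (0, -1)), ((0, -1), (-1, 0)), ((-1, 0), (0, 1))]

-- count_corners (iterates the region's point set; the result is a sum, order-independent)
def pvCountCornersA (pts : PySem.Set (Int × Int)) : Int :=
  pts.foldl (fun corners p =>
    pvPairsA.foldl (fun corners dd =>
      let firstIn := PySem.Set.contains pts (p.1 + dd.1.1, p.2 + dd.1.2)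
      let secondIn := PySem.Set.contains pts (p.1 + dd.2.1, p.2 + dd.2.2)
      let isOutside := !firstIn && !secondIn
      let diagonal := (p.1 + dd.1.1 + dd.2.1, p.2 + dd.1.2 + dd.2.2)
      let isInside := firstIn && secondIn && !(PySem.Set.contains pts diagonal)
      if isOutside || isInside then corners + 1 else corners) corners) 0

def part2 (text : String) : Int :=
  let regions := (pvFindRegionsA text).1
  (regions.map (fun r => PySem.Set.len r.2 * pvCountCornersA r.2)).sum

-- ===== PORT B =====
-- Source B count_corners (its `pairs` tuple is the same literal as A's, shared as pvPairsA)
def pvCountCornersB (pts : PySem.Set (Int × Int)) : Int :=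
  pts.foldl (fun corners p =>
    pvPairsA.foldl (fun corners dd =>
      let firstIn := PySem.Set.contains pts (p.1 + dd.1.1, p.2 + dd.1.2)
      let secondIn := PySem.Set.contains pts (p.1 + dd.2.1, p.2 + dd.2.2)
      if firstIn && secondIn then
        if !(PySem.Set.contains pts (p.1 + dd.1.1 + dd.2.1, p.2 + dd.1.2 + dd.2.2)) then
          corners + 1
        else corners
      else if !firstIn && !secondIn then corners + 1 else corners) corners) 0

-- Source B `while stack:` loop; state = (visited, stack, pts); Python's stack.pop() takes the
-- LAST element (getLast?/dropLast); fuel = keys+1 (each iteration pops one stack entry and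
-- every push marks a fresh unvisited key, so it never runs out)
def pvFloodB (pl : PySem.Dict (Int × Int) Char) (plant : Char) :
    Nat → PySem.Set (Int × Int) × List (Int × Int) × PySem.Set (Int × Int) →
    PySem.Set (Int × Int) × PySem.Set (Int × Int)
  | 0, (vis, _, pts) => (vis, pts)
  | fuel + 1, (vis, stack, pts) =>
    match stack.getLast? with
    | none => (vis, pts)
    | some p =>
      let stack := stack.dropLast
      let pts := PySem.Set.add pts p
      let vs := [(p.1 - 1, p.2), (p.1 + 1, p.2), (p.1, p.2 - 1), (p.1, p.2 + 1)].foldl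
        (fun (vs : PySem.Set (Int × Int) × List (Int × Int)) nb =>
          if !(PySem.Set.contains vs.1 nb) && (pl.get? nb == some plant) then
            (PySem.Set.add vs.1 nb, vs.2 ++ [nb])
          else vs) (vis, stack)
      pvFloodB pl plant fuel (vs.1, vs.2, pts)

def part2_alt (text : String) : Int :=
  -- text.split("\n"); enumerate(row) iterates the row's characters
  let pl := (PySem.List.enumerate (PySem.Chars.splitOn text.toList ['\n']) 0).foldl
    (fun d yrow =>
      (PySem.List.enumerate yrow.2 0).foldl (fun d xch => d.insert (xch.1, yrow.1) xch.2) d)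
    PySem.Dict.empty
  let res := pl.keys.foldl (fun (st : PySem.Set (Int × Int) × Int) start =>
    if PySem.Set.contains st.1 start then st
    else
      -- plants[start]: start is a dict key, so the default is never taken
      let plant := (pl.get? start).getD ' '
      let vp := pvFloodB pl plant (pl.keys.length + 1)
        (PySem.Set.add st.1 start, [start], PySem.Set.empty)
      (vp.1, st.2 + PySem.Set.len vp.2 * pvCountCornersB vp.2))
    (PySem.Set.empty, 0)
  res.2

-- ===== PRECONDITION & SPEC =====
def Spec_part2 (text : String) (out : Int) : Prop := out = part2_alt text
instance (text : String) (out : Int) : Decidable (Spec_part2 text out) := by unfold Spec_part2; infer_instance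

-- ===== CLAIM (what is proved, stated in full; the proofs are below) =====
def Claim_equal_part2 : Prop := ∀ (text : String), Dom_part2 text → Spec_part2 text (part2 text)

-- ===== LEMMAS AND PROOFS =====
-- ---- common notions for the proofs ----

-- the four orthogonal neighbours of a cell (B's literal neighbour tuple)
def pvNbrs (p : Int × Int) : List (Int × Int) :=
  [(p.1 - 1, p.2), (p.1 + 1, p.2), (p.1, p.2 - 1), (p.1, p.2 + 1)]

-- same-plant adjacency in the plant map
def pvAdj (pl : PySem.Dict (Int × Int) Char) (a b : Int × Int) : Prop :=
  b ∈ pvNbrs a ∧ ∃ c : Char, pl.get? a = some c ∧ pl.get? b = some c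

-- reachability by same-plant adjacency avoiding the visited set v
def pvRA (pl : PySem.Dict (Int × Int) Char) (v : List (Int × Int)) (s q : Int × Int) : Prop :=
  Relation.ReflTransGen (fun a b => pvAdj pl a b ∧ b ∉ v) s q

lemma pvRA_plant {pl : PySem.Dict (Int × Int) Char} {v : List (Int × Int)} {s q : Int × Int}
    (h : pvRA pl v s q) : pl.get? q = pl.get? s := by
  induction h with
  | refl => rfl
  | tail _ hbc ih =>
    obtain ⟨⟨_, c, hc1, hc2⟩, _⟩ := hbc
    rw [hc2, ← hc1, ih]

lemma pvRA_not_mem {pl : PySem.Dict (Int × Int) Char} {v : List (Int × Int)} {s q : Int × Int}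
    (hs : s ∉ v) (h : pvRA pl v s q) : q ∉ v := by
  induction h with
  | refl => exact hs
  | tail _ hbc _ => exact hbc.2

lemma pvRA_mono {pl : PySem.Dict (Int × Int) Char} {v w : List (Int × Int)} {s q : Int × Int}
    (hvw : ∀ x, x ∈ v → x ∈ w) (h : pvRA pl w s q) : pvRA pl v s q :=
  Relation.ReflTransGen.mono (fun _ _ hab => ⟨hab.1, fun hm => hab.2 (hvw _ hm)⟩) h

lemma mem_pvNbrs_iff {r q : Int × Int} :
    r ∈ pvNbrs q ↔ ∃ d ∈ pvDirectionsA, r = (q.1 + d.1, q.2 + d.2) := by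
  simp only [pvNbrs, pvDirectionsA, List.mem_cons, List.not_mem_nil, or_false]
  constructor
  · rintro (rfl | rfl | rfl | rfl)
    · exact ⟨(-1, 0), Or.inl rfl, by simp [Prod.ext_iff]; omega⟩
    · exact ⟨(1, 0), Or.inr (Or.inl rfl), by simp [Prod.ext_iff]⟩
    · exact ⟨(0, -1), Or.inr (Or.inr (Or.inl rfl)), by simp [Prod.ext_iff]; omega⟩
    · exact ⟨(0, 1), Or.inr (Or.inr (Or.inr rfl)), by simp [Prod.ext_iff]⟩
  · rintro ⟨d, (rfl | rfl | rfl | rfl), rfl⟩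
    · refine Or.inl ?_; simp [Prod.ext_iff]; omega
    · refine Or.inr (Or.inl ?_); simp [Prod.ext_iff]
    · refine Or.inr (Or.inr (Or.inl ?_)); simp [Prod.ext_iff]; omega
    · refine Or.inr (Or.inr (Or.inr ?_)); simp [Prod.ext_iff]

-- Bool bridge: Set.contains as membership
lemma pvContains_iff {v : List (Int × Int)} {q : Int × Int} :
    PySem.Set.contains v q = true ↔ q ∈ v := PySem.Set.contains_iff v q

lemma pvContains_false_iff {v : List (Int × Int)} {q : Int × Int} :
    PySem.Set.contains v q = false ↔ q ∉ v := by
  rw [← Bool.not_eq_true, not_iff_not]; exact pvContains_iff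

-- filter-by-unvisited length lemmas
lemma pvFilterLen_mono {keys v w : List (Int × Int)} (hvw : ∀ x, x ∈ v → x ∈ w) :
    (keys.filter (fun q => !PySem.Set.contains w q)).length ≤
      (keys.filter (fun q => !PySem.Set.contains v q)).length := by
  induction keys with
  | nil => simp
  | cons k ks ih =>
    by_cases hk2 : k ∈ v
    · have h1 : (!PySem.Set.contains v k) = false := by simpa using hk2
      have h2 : (!PySem.Set.contains w k) = false := by simpa using hvw _ hk2
      simp only [List.filter_cons, h1, h2, Bool.false_eq_true, if_false]
      exact ih
    · have h1 : (!PySem.Set.contains v k) = true := by simpa using hk2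
      by_cases hk : k ∈ w
      · have h2 : (!PySem.Set.contains w k) = false := by simpa using hk
        simp only [List.filter_cons, h1, h2, Bool.false_eq_true, if_false, if_true,
          List.length_cons]
        omega
      · have h2 : (!PySem.Set.contains w k) = true := by simpa using hk
        simp only [List.filter_cons, h1, h2, if_true, List.length_cons]
        omega

lemma pvFilterLen_add {keys v : List (Int × Int)} {p : Int × Int}
    (hnd : keys.Nodup) (hp : p ∈ keys) (hpv : p ∉ v) :
    (keys.filter (fun q => !PySem.Set.contains (PySem.Set.add v p) q)).length + 1 =
      (keys.filter (fun q => !PySem.Set.contains v q)).length := by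
  induction keys with
  | nil => simp at hp
  | cons k ks ih =>
    by_cases hkp : k = p
    · subst hkp
      have h1 : (!PySem.Set.contains (PySem.Set.add v k) k) = false := by
        simp [PySem.Set.mem_add]
      have h2 : (!PySem.Set.contains v k) = true := by simpa using hpv
      simp only [List.filter_cons, h1, h2, Bool.false_eq_true, if_false, if_true,
        List.length_cons]
      have hkks : k ∉ ks := (List.nodup_cons.1 hnd).1
      have : ks.filter (fun q => !PySem.Set.contains (PySem.Set.add v k) q)
          = ks.filter (fun q => !PySem.Set.contains v q) := by
        apply List.filter_congr
        intro x hx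
        have hxk : x ≠ k := fun h => hkks (h ▸ hx)
        by_cases hxv : x ∈ v
        · have e1 : (!PySem.Set.contains (PySem.Set.add v k) x) = false := by
            simp [PySem.Set.mem_add, hxv]
          have e2 : (!PySem.Set.contains v x) = false := by simpa using hxv
          rw [e1, e2]
        · have e1 : (!PySem.Set.contains (PySem.Set.add v k) x) = true := by
            simp [PySem.Set.mem_add, hxv, hxk]
          have e2 : (!PySem.Set.contains v x) = true := by simpa using hxv
          rw [e1, e2]
      rw [this]
    · have hp' : p ∈ ks := (List.mem_cons.1 hp).resolve_left (fun h => hkp h.symm)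
      have ih' := ih (List.nodup_cons.1 hnd).2 hp'
      have hcond : (!PySem.Set.contains (PySem.Set.add v p) k) = (!PySem.Set.contains v k) := by
        by_cases hkv : k ∈ v
        · have e1 : (!PySem.Set.contains (PySem.Set.add v p) k) = false := by
            simp [PySem.Set.mem_add, hkv]
          have e2 : (!PySem.Set.contains v k) = false := by simpa using hkv
          rw [e1, e2]
        · have e1 : (!PySem.Set.contains (PySem.Set.add v p) k) = true := by
            simp [PySem.Set.mem_add, hkv, hkp]
          have e2 : (!PySem.Set.contains v k) = true := by simpa using hkv
          rw [e1, e2]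
      simp only [List.filter_cons, hcond]
      by_cases hkv : (!PySem.Set.contains v k) = true
      · simp only [hkv, if_true, List.length_cons]
        omega
      · simp only [hkv, if_false]
        · exact ih'

-- ---- A-side: characterisation of dfs_collect_region ----

-- the body of A's direction loop, named for the proofs (definitionally the foldl body of pvDfsA)
def pvStepA (pl : PySem.Dict (Int × Int) Char) (fuel : Nat) (point : Int × Int)
    (st : PySem.Set (Int × Int) × List (Int × Int) × PySem.Set (Int × Int)) (d : Int × Int) :
    PySem.Set (Int × Int) × List (Int × Int) × PySem.Set (Int × Int) :=
  if d.1 == 0 && d.2 == 0 then st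
  else
    let newPoint := (point.1 + d.1, point.2 + d.2)
    let newVal := pl.get? newPoint
    if newVal.isSome && !(PySem.Set.contains st.1 newPoint) then
      if newVal == pl.get? point then pvDfsA pl fuel newPoint st else st
    else st

lemma pvDfsA_succ (pl : PySem.Dict (Int × Int) Char) (fuel : Nat) (point : Int × Int)
    (vis queue reg : List (Int × Int)) :
    pvDfsA pl (fuel + 1) point (vis, queue, reg) =
      pvDirectionsA.foldl (pvStepA pl fuel point)
        (PySem.Set.add vis point,
         (if queue.contains point then (PySem.List.remove? queue point).getD queue else queue),
         PySem.Set.add reg point) := rfl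

-- dropping the coarser of two nested unvisited-filters
lemma pvFilter_filter_absorb {l v w : List (Int × Int)} (hvw : ∀ x, x ∈ v → x ∈ w) :
    (l.filter (fun q => !PySem.Set.contains v q)).filter (fun q => !PySem.Set.contains w q) =
      l.filter (fun q => !PySem.Set.contains w q) := by
  induction l with
  | nil => simp
  | cons k ks ihl =>
    by_cases hkv : k ∈ v
    · have h1 : (!PySem.Set.contains v k) = false := by simpa using hkv
      have h2 : (!PySem.Set.contains w k) = false := by simpa using hvw _ hkv
      simp only [List.filter_cons, h1, h2, Bool.false_eq_true, if_false]
      exact ihl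
    · have h1 : (!PySem.Set.contains v k) = true := by simpa using hkv
      by_cases hkw : k ∈ w
      · have h2 : (!PySem.Set.contains w k) = false := by simpa using hkw
        simp only [List.filter_cons, h1, h2, Bool.false_eq_true, if_false, if_true]
        exact ihl
      · have h2 : (!PySem.Set.contains w k) = true := by simpa using hkw
        simp only [List.filter_cons, h1, h2, if_true]
        rw [ihl]

-- everything the equivalence proof needs to know about one dfs call
def PvAOut (pl : PySem.Dict (Int × Int) Char) (p : Int × Int)
    (vis queue reg : List (Int × Int))
    (out : PySem.Set (Int × Int) × List (Int × Int) × PySem.Set (Int × Int)) : Prop :=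
  (∀ q ∈ vis, q ∈ out.1) ∧ (p ∈ out.1) ∧
  (∀ q ∈ out.1, q ∈ pl.keys) ∧ out.1.Nodup ∧ out.2.2.Nodup ∧
  (∀ q, q ∈ out.2.2 ↔ q ∈ reg ∨ (q ∈ out.1 ∧ q ∉ vis)) ∧
  (out.2.1 = queue.filter (fun q => !PySem.Set.contains out.1 q)) ∧
  (∀ q ∈ out.1, q ∈ vis ∨ pvRA pl vis p q) ∧
  (∀ q ∈ out.1, q ∉ vis → ∀ r, pvAdj pl q r → r ∈ out.1)

-- invariant carried along the direction fold inside one call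
def PvAInv (pl : PySem.Dict (Int × Int) Char) (p : Int × Int)
    (vis queue reg : List (Int × Int))
    (st : PySem.Set (Int × Int) × List (Int × Int) × PySem.Set (Int × Int)) : Prop :=
  (∀ q ∈ PySem.Set.add vis p, q ∈ st.1) ∧ (∀ q ∈ st.1, q ∈ pl.keys) ∧
  st.1.Nodup ∧ st.2.2.Nodup ∧
  (∀ q, q ∈ st.2.2 ↔ q ∈ PySem.Set.add reg p ∨ (q ∈ st.1 ∧ q ∉ PySem.Set.add vis p)) ∧
  (st.2.1 = queue.filter (fun q => !PySem.Set.contains st.1 q)) ∧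
  (∀ q ∈ st.1, q ∈ vis ∨ pvRA pl vis p q)

lemma pvDfsA_master (pl : PySem.Dict (Int × Int) Char) (hnd : pl.keys.Nodup) :
    ∀ (fuel : Nat) (p : Int × Int) (vis queue reg : List (Int × Int)),
      (∀ q ∈ vis, q ∈ pl.keys) → vis.Nodup → reg.Nodup → queue.Nodup →
      (∀ q ∈ queue, q ∉ vis) → p ∈ pl.keys → p ∉ vis →
      (pl.keys.filter (fun q => !PySem.Set.contains vis q)).length < fuel →
      PvAOut pl p vis queue reg (pvDfsA pl fuel p (vis, queue, reg)) := by
  intro fuel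
  induction fuel with
  | zero => intro p vis queue reg _ _ _ _ _ _ _ hfuel; omega
  | succ fuel ih =>
    intro p vis queue reg hvK hvNd hrNd hqNd hqv hp hpv hfuel
    rw [pvDfsA_succ]
    have hmemvis1 : ∀ q, q ∈ PySem.Set.add vis p ↔ q ∈ vis ∨ q = p := by
      intro q; exact PySem.Set.mem_add vis p q
    have hq1 : (if queue.contains p then (PySem.List.remove? queue p).getD queue else queue) =
        queue.filter (fun q => !PySem.Set.contains (PySem.Set.add vis p) q) := by
      have hcond : ∀ x ∈ queue, (x != p) = (!PySem.Set.contains (PySem.Set.add vis p) x) := by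
        intro x hx
        by_cases hxp : x = p
        · subst hxp
          have hm : x ∈ PySem.Set.add vis x := (hmemvis1 x).2 (Or.inr rfl)
          simp [hm]
        · have hm : x ∉ PySem.Set.add vis p := by
            rw [hmemvis1]; push_neg; exact ⟨hqv x hx, hxp⟩
          simp [hxp, hm]
      by_cases hpq : p ∈ queue
      · have hc : queue.contains p = true := by simpa using hpq
        rw [if_pos hc, PySem.List.remove?_eq_some_erase queue p hpq]
        simp only [Option.getD_some]
        rw [List.Nodup.erase_eq_filter hqNd]
        exact List.filter_congr hcond
      · have hc : queue.contains p = false := by simpa using hpq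
        rw [if_neg (by simp [hpq])]
        refine (List.filter_eq_self.2 ?_).symm
        intro x hx
        rw [← hcond x hx]
        simp only [bne_iff_ne, ne_eq]
        intro hxp
        exact hpq (hxp ▸ hx)
    rw [hq1]
    obtain ⟨c0, hc0⟩ : ∃ c, pl.get? p = some c := by
      cases h : pl.get? p with
      | none => exact absurd ((PySem.Dict.get?_eq_none_iff_not_mem_keys _ _).1 h) (by simp [hp])
      | some c => exact ⟨c, rfl⟩
    have hLen1 : (pl.keys.filter (fun q =>
        !PySem.Set.contains (PySem.Set.add vis p) q)).length < fuel := by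
      have := pvFilterLen_add (keys := pl.keys) (v := vis) (p := p) hnd hp hpv
      omega
    -- the direction fold
    have aux : ∀ ds : List (Int × Int), (∀ d ∈ ds, d ∈ pvDirectionsA) →
        ∀ st, PvAInv pl p vis queue reg st →
        (∀ q ∈ st.1, q ∈ (List.foldl (pvStepA pl fuel p) st ds).1) ∧
        PvAInv pl p vis queue reg (List.foldl (pvStepA pl fuel p) st ds) ∧
        (∀ q ∈ (List.foldl (pvStepA pl fuel p) st ds).1, q ∉ st.1 →
          ∀ r, pvAdj pl q r → r ∈ (List.foldl (pvStepA pl fuel p) st ds).1) ∧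
        (∀ d ∈ ds, ∀ c, pl.get? p = some c →
          pl.get? (p.1 + d.1, p.2 + d.2) = some c →
          (p.1 + d.1, p.2 + d.2) ∈ (List.foldl (pvStepA pl fuel p) st ds).1) := by
      intro ds
      induction ds with
      | nil =>
        intro _ st hst
        exact ⟨fun q hq => hq, hst, fun q hq hq' => absurd hq hq', by simp⟩
      | cons d ds ihds =>
        intro hds st hst
        obtain ⟨sv, sq, sr⟩ := st
        obtain ⟨i1, i2, i3, i4, i5, i6, i7⟩ := hst
        dsimp only at i1 i2 i3 i4 i5 i6 i7
        simp only [List.foldl_cons]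
        have hdmem : d ∈ pvDirectionsA := hds d List.mem_cons_self
        have hdstail : ∀ d' ∈ ds, d' ∈ pvDirectionsA :=
          fun d' hd' => hds d' (List.mem_cons_of_mem _ hd')
        have hz : (d.1 == 0 && d.2 == 0) = false := by
          simp only [pvDirectionsA, List.mem_cons, List.not_mem_nil, or_false] at hdmem
          rcases hdmem with rfl | rfl | rfl | rfl <;> decide
        by_cases hguard : ((pl.get? (p.1 + d.1, p.2 + d.2)).isSome &&
            !(PySem.Set.contains sv (p.1 + d.1, p.2 + d.2))) = true
        · by_cases hval : (pl.get? (p.1 + d.1, p.2 + d.2) == pl.get? p) = true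
          · -- the recursive call happens
            have hstep : pvStepA pl fuel p (sv, sq, sr) d =
                pvDfsA pl fuel (p.1 + d.1, p.2 + d.2) (sv, sq, sr) := by
              simp only [pvStepA, hz, Bool.false_eq_true, if_false]
              simp only [hguard, hval, if_true]
            rw [hstep]
            obtain ⟨hsome, hnc⟩ := Bool.and_eq_true_iff.1 hguard
            have hnpvis : (p.1 + d.1, p.2 + d.2) ∉ sv := by
              have h' : PySem.Set.contains sv (p.1 + d.1, p.2 + d.2) = false := by
                simpa using hnc
              exact pvContains_false_iff.1 h'
            have hnpval : pl.get? (p.1 + d.1, p.2 + d.2) = some c0 := by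
              have h' := (beq_iff_eq).1 hval
              rw [h', hc0]
            have hnpkeys : (p.1 + d.1, p.2 + d.2) ∈ pl.keys := by
              by_contra hcon
              rw [(PySem.Dict.get?_eq_none_iff_not_mem_keys _ _).2 hcon] at hnpval
              simp at hnpval
            have hqNd' : sq.Nodup := by rw [i6]; exact hqNd.filter _
            have hqv' : ∀ q ∈ sq, q ∉ sv := by
              rw [i6]; intro q hq
              have h' := (List.mem_filter.1 hq).2
              exact pvContains_false_iff.1 (by simpa using h')
            have hfuel' : (pl.keys.filter (fun q => !PySem.Set.contains sv q)).length < fuel :=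
              lt_of_le_of_lt (pvFilterLen_mono (fun x hx => i1 x hx)) hLen1
            have hout := ih (p.1 + d.1, p.2 + d.2) sv sq sr i2 i3 i4 hqNd' hqv' hnpkeys hnpvis hfuel'
            rcases hsplit : pvDfsA pl fuel (p.1 + d.1, p.2 + d.2) (sv, sq, sr) with ⟨ov, oq, orr⟩
            rw [hsplit] at hout
            obtain ⟨m1, m2, m3, m4, m5, m6, m7, m8, m9⟩ := hout
            dsimp only at m1 m2 m3 m4 m5 m6 m7 m8 m9
            have hRApnp : pvRA pl vis p (p.1 + d.1, p.2 + d.2) := by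
              refine Relation.ReflTransGen.single ⟨⟨mem_pvNbrs_iff.2 ⟨d, hdmem, rfl⟩,
                ⟨c0, hc0, hnpval⟩⟩, ?_⟩
              exact fun hcon => hnpvis (i1 _ ((hmemvis1 _).2 (Or.inl hcon)))
            -- transported invariant
            have j1 : ∀ q ∈ PySem.Set.add vis p, q ∈ ov := fun q hq => m1 q (i1 q hq)
            have j5 : ∀ q, q ∈ orr ↔
                q ∈ PySem.Set.add reg p ∨ (q ∈ ov ∧ q ∉ PySem.Set.add vis p) := by
              intro q
              rw [m6 q, i5 q]
              constructor
              · rintro ((h | ⟨h1, h2⟩) | ⟨h1, h2⟩)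
                · exact Or.inl h
                · exact Or.inr ⟨m1 q h1, h2⟩
                · exact Or.inr ⟨h1, fun hcon => h2 (i1 q hcon)⟩
              · rintro (h | ⟨h1, h2⟩)
                · exact Or.inl (Or.inl h)
                · by_cases hsv : q ∈ sv
                  · exact Or.inl (Or.inr ⟨hsv, h2⟩)
                  · exact Or.inr ⟨h1, hsv⟩
            have j6 : oq = queue.filter (fun q => !PySem.Set.contains ov q) := by
              rw [m7, i6]
              exact pvFilter_filter_absorb m1
            have j7 : ∀ q ∈ ov, q ∈ vis ∨ pvRA pl vis p q := by
              intro q hq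
              rcases m8 q hq with hsv | hra
              · exact i7 q hsv
              · refine Or.inr (Relation.ReflTransGen.trans hRApnp ?_)
                exact pvRA_mono (fun x hx => i1 x ((hmemvis1 x).2 (Or.inl hx))) hra
            obtain ⟨a0, a1, a2, a3⟩ := ihds hdstail (ov, oq, orr) ⟨j1, m3, m4, m5, j5, j6, j7⟩
            refine ⟨fun q hq => a0 q (m1 q hq), a1, ?_, ?_⟩
            · intro q hq hq' r hadj
              by_cases hmid : q ∈ ov
              · exact a0 r (m9 q hmid hq' r hadj)
              · exact a2 q hq hmid r hadj
            · intro d' hd' c hc hcnp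
              rcases List.mem_cons.1 hd' with rfl | hd'
              · exact a0 _ m2
              · exact a3 d' hd' c hc hcnp
          · -- same guard but different plant: no-op step
            have hval' : (pl.get? (p.1 + d.1, p.2 + d.2) == pl.get? p) = false := by
              simpa using hval
            have hstep : pvStepA pl fuel p (sv, sq, sr) d = (sv, sq, sr) := by
              simp only [pvStepA, hz, Bool.false_eq_true, if_false]
              simp only [hguard, if_true, hval', Bool.false_eq_true, if_false]
            rw [hstep]
            obtain ⟨a0, a1, a2, a3⟩ := ihds hdstail (sv, sq, sr) ⟨i1, i2, i3, i4, i5, i6, i7⟩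
            refine ⟨a0, a1, a2, ?_⟩
            intro d' hd' c hc hcnp
            rcases List.mem_cons.1 hd' with rfl | hd'
            · exfalso
              apply absurd hval
              simp only [Bool.not_eq_true]
              rw [hcnp, hc]
              simp
            · exact a3 d' hd' c hc hcnp
        · -- guard false: no-op step
          have hguard' : ((pl.get? (p.1 + d.1, p.2 + d.2)).isSome &&
              !(PySem.Set.contains sv (p.1 + d.1, p.2 + d.2))) = false := by
            simpa using hguard
          have hstep : pvStepA pl fuel p (sv, sq, sr) d = (sv, sq, sr) := by
            simp only [pvStepA, hz, Bool.false_eq_true, if_false]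
            simp only [hguard', Bool.false_eq_true, if_false]
          rw [hstep]
          obtain ⟨a0, a1, a2, a3⟩ := ihds hdstail (sv, sq, sr) ⟨i1, i2, i3, i4, i5, i6, i7⟩
          refine ⟨a0, a1, a2, ?_⟩
          intro d' hd' c hc hcnp
          rcases List.mem_cons.1 hd' with rfl | hd'
          · -- the guard can only fail because the neighbour is already visited
            have hsome : (pl.get? (p.1 + d'.1, p.2 + d'.2)).isSome = true := by
              rw [hcnp]; rfl
            have hin : PySem.Set.contains sv (p.1 + d'.1, p.2 + d'.2) = true := by
              by_contra hcon
              have hcon' : PySem.Set.contains sv (p.1 + d'.1, p.2 + d'.2) = false := by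
                simpa using hcon
              apply hguard
              rw [Bool.and_eq_true_iff]
              exact ⟨hsome, by rw [hcon']; rfl⟩
            exact a0 _ (pvContains_iff.1 hin)
          · exact a3 d' hd' c hc hcnp
    -- establish the invariant at the entry state and conclude
    have inv0 : PvAInv pl p vis queue reg
        (PySem.Set.add vis p,
         queue.filter (fun q => !PySem.Set.contains (PySem.Set.add vis p) q),
         PySem.Set.add reg p) := by
      refine ⟨fun q hq => hq, ?_, PySem.Set.nodup_add vis p hvNd, PySem.Set.nodup_add reg p hrNd,
        ?_, rfl, ?_⟩
      · intro q hq
        rcases (hmemvis1 q).1 hq with h | rfl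
        · exact hvK q h
        · exact hp
      · intro q
        constructor
        · exact fun h => Or.inl h
        · rintro (h | ⟨h1, h2⟩)
          · exact h
          · exact absurd h1 h2
      · intro q hq
        rcases (hmemvis1 q).1 hq with h | rfl
        · exact Or.inl h
        · exact Or.inr Relation.ReflTransGen.refl
    obtain ⟨a0, a1, a2, a3⟩ := aux pvDirectionsA (fun d hd => hd) _ inv0
    obtain ⟨k1, k2, k3, k4, k5, k6, k7⟩ := a1
    refine ⟨?_, ?_, k2, k3, k4, ?_, k6, k7, ?_⟩
    · exact fun q hq => k1 q ((hmemvis1 q).2 (Or.inl hq))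
    · exact k1 p ((hmemvis1 p).2 (Or.inr rfl))
    · -- region tracking relative to the original reg/vis
      intro q
      rw [k5 q]
      constructor
      · rintro (h | ⟨h1, h2⟩)
        · rcases (PySem.Set.mem_add reg p q).1 h with h' | rfl
          · exact Or.inl h'
          · exact Or.inr ⟨k1 _ ((hmemvis1 _).2 (Or.inr rfl)), hpv⟩
        · exact Or.inr ⟨h1, fun hcon => h2 ((hmemvis1 q).2 (Or.inl hcon))⟩
      · rintro (h | ⟨h1, h2⟩)
        · exact Or.inl ((PySem.Set.mem_add reg p q).2 (Or.inl h))
        · by_cases hqp : q = p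
          · exact Or.inl ((PySem.Set.mem_add reg p q).2 (Or.inr hqp))
          · refine Or.inr ⟨h1, fun hcon => ?_⟩
            rcases (hmemvis1 q).1 hcon with h' | h'
            · exact h2 h'
            · exact hqp h'
    · -- closure
      intro q hq hqvis r hadj
      by_cases hqp : q = p
      · subst hqp
        obtain ⟨hnbr, c, hcq, hcr⟩ := hadj
        obtain ⟨d, hd, rfl⟩ := mem_pvNbrs_iff.1 hnbr
        exact a3 d hd c hcq hcr
      · have hq1' : q ∉ PySem.Set.add vis p := by
          rw [hmemvis1]; push_neg; exact ⟨hqvis, hqp⟩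
        exact a2 q hq hq1' r hadj

-- the usable characterisation of one top-level dfs call
lemma pvDfsA_char (pl : PySem.Dict (Int × Int) Char) (hnd : pl.keys.Nodup)
    (fuel : Nat) (p : Int × Int) (vis queue reg : List (Int × Int))
    (hvK : ∀ q ∈ vis, q ∈ pl.keys) (hvNd : vis.Nodup) (hrNd : reg.Nodup) (hqNd : queue.Nodup)
    (hqv : ∀ q ∈ queue, q ∉ vis) (hp : p ∈ pl.keys) (hpv : p ∉ vis)
    (hfuel : (pl.keys.filter (fun q => !PySem.Set.contains vis q)).length < fuel) :
    (∀ q, q ∈ (pvDfsA pl fuel p (vis, queue, reg)).1 ↔ q ∈ vis ∨ pvRA pl vis p q) ∧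
    (∀ q, q ∈ (pvDfsA pl fuel p (vis, queue, reg)).2.2 ↔ q ∈ reg ∨ pvRA pl vis p q) ∧
    ((pvDfsA pl fuel p (vis, queue, reg)).2.1 =
      queue.filter (fun q => !PySem.Set.contains (pvDfsA pl fuel p (vis, queue, reg)).1 q)) ∧
    (∀ q ∈ (pvDfsA pl fuel p (vis, queue, reg)).1, q ∈ pl.keys) ∧
    (pvDfsA pl fuel p (vis, queue, reg)).1.Nodup ∧
    (pvDfsA pl fuel p (vis, queue, reg)).2.2.Nodup := by
  obtain ⟨m1, m2, m3, m4, m5, m6, m7, m8, m9⟩ :=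
    pvDfsA_master pl hnd fuel p vis queue reg hvK hvNd hrNd hqNd hqv hp hpv hfuel
  have hvisiff : ∀ q, q ∈ (pvDfsA pl fuel p (vis, queue, reg)).1 ↔ q ∈ vis ∨ pvRA pl vis p q := by
    intro q
    constructor
    · exact m8 q
    · rintro (h | h)
      · exact m1 q h
      · have : q ∈ (pvDfsA pl fuel p (vis, queue, reg)).1 ∧ q ∉ vis := by
          induction h with
          | refl => exact ⟨m2, hpv⟩
          | tail _ hbc ihq =>
            obtain ⟨hadj, hbv⟩ := hbc
            exact ⟨m9 _ ihq.1 ihq.2 _ hadj, hbv⟩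
        exact this.1
  refine ⟨hvisiff, ?_, m7, m3, m4, m5⟩
  intro q
  rw [m6 q]
  constructor
  · rintro (h | ⟨h1, h2⟩)
    · exact Or.inl h
    · rcases (hvisiff q).1 h1 with h | h
      · exact absurd h h2
      · exact Or.inr h
  · rintro (h | h)
    · exact Or.inl h
    · exact Or.inr ⟨(hvisiff q).2 (Or.inr h), pvRA_not_mem hpv h⟩

-- ---- B-side: characterisation of the stack flood fill ----

-- the body of B's push loop, named for the proofs
def pvPushB (pl : PySem.Dict (Int × Int) Char) (plant : Char)
    (vs : PySem.Set (Int × Int) × List (Int × Int)) (nb : Int × Int) :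
    PySem.Set (Int × Int) × List (Int × Int) :=
  if !(PySem.Set.contains vs.1 nb) && (pl.get? nb == some plant) then
    (PySem.Set.add vs.1 nb, vs.2 ++ [nb])
  else vs

lemma pvFloodB_succ_none (pl : PySem.Dict (Int × Int) Char) (plant : Char) (fuel : Nat)
    (vis stack pts : List (Int × Int)) (h : stack.getLast? = none) :
    pvFloodB pl plant (fuel + 1) (vis, stack, pts) = (vis, pts) := by
  simp only [pvFloodB, h]

lemma pvFloodB_succ_some (pl : PySem.Dict (Int × Int) Char) (plant : Char) (fuel : Nat)
    (vis stack pts : List (Int × Int)) (p : Int × Int) (h : stack.getLast? = some p) :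
    pvFloodB pl plant (fuel + 1) (vis, stack, pts) =
      pvFloodB pl plant fuel
        (((pvNbrs p).foldl (pvPushB pl plant) (vis, stack.dropLast)).1,
         ((pvNbrs p).foldl (pvPushB pl plant) (vis, stack.dropLast)).2,
         PySem.Set.add pts p) := by
  simp only [pvFloodB, h, pvNbrs, pvPushB]
  rfl

-- what one pass of the push loop does
lemma pvPushB_fold (pl : PySem.Dict (Int × Int) Char) (plant : Char) :
    ∀ (nbs : List (Int × Int)) (vis stack : List (Int × Int)),
      ∃ new : List (Int × Int),
        (nbs.foldl (pvPushB pl plant) (vis, stack)).1 = vis ++ new ∧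
        (nbs.foldl (pvPushB pl plant) (vis, stack)).2 = stack ++ new ∧
        new.Nodup ∧
        (∀ n ∈ new, n ∉ vis ∧ n ∈ nbs ∧ pl.get? n = some plant) ∧
        (∀ r ∈ nbs, pl.get? r = some plant → r ∈ vis ++ new) := by
  intro nbs
  induction nbs with
  | nil =>
    intro vis stack
    exact ⟨[], by simp, by simp, List.nodup_nil, by simp, by simp⟩
  | cons nb nbs ihn =>
    intro vis stack
    by_cases hg : (!(PySem.Set.contains vis nb) && (pl.get? nb == some plant)) = true
    · obtain ⟨hnc, hbeq⟩ := Bool.and_eq_true_iff.1 hg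
      have hnbvis : nb ∉ vis := pvContains_false_iff.1 (by simpa using hnc)
      have hnbval : pl.get? nb = some plant := (beq_iff_eq).1 hbeq
      have hstep : pvPushB pl plant (vis, stack) nb = (vis ++ [nb], stack ++ [nb]) := by
        simp only [pvPushB, hg, if_true]
        rw [PySem.Set.add_of_not_mem hnbvis]
      rw [List.foldl_cons, hstep]
      obtain ⟨new', h1, h2, h3, h4, h5⟩ := ihn (vis ++ [nb]) (stack ++ [nb])
      refine ⟨nb :: new', ?_, ?_, ?_, ?_, ?_⟩
      · rw [h1, List.append_assoc]; rfl
      · rw [h2, List.append_assoc]; rfl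
      · refine List.nodup_cons.2 ⟨fun hcon => ?_, h3⟩
        exact (h4 nb hcon).1 (by simp)
      · intro n hn
        rcases List.mem_cons.1 hn with rfl | hn
        · exact ⟨hnbvis, List.mem_cons_self, hnbval⟩
        · obtain ⟨hn1, hn2, hn3⟩ := h4 n hn
          exact ⟨fun hcon => hn1 (List.mem_append_left _ hcon),
            List.mem_cons_of_mem _ hn2, hn3⟩
      · intro r hr hrv
        rcases List.mem_cons.1 hr with rfl | hr
        · simp
        · have := h5 r hr hrv
          rw [List.append_assoc] at this
          simpa using this
    · have hg' : (!(PySem.Set.contains vis nb) && (pl.get? nb == some plant)) = false := by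
        simpa using hg
      have hstep : pvPushB pl plant (vis, stack) nb = (vis, stack) := by
        simp only [pvPushB, hg', Bool.false_eq_true, if_false]
      rw [List.foldl_cons, hstep]
      obtain ⟨new', h1, h2, h3, h4, h5⟩ := ihn vis stack
      refine ⟨new', h1, h2, h3, ?_, ?_⟩
      · intro n hn
        obtain ⟨hn1, hn2, hn3⟩ := h4 n hn
        exact ⟨hn1, List.mem_cons_of_mem _ hn2, hn3⟩
      · intro r hr hrv
        rcases List.mem_cons.1 hr with rfl | hr
        · -- the guard failed though the plant matched: r is already visited
          have : PySem.Set.contains vis r = true := by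
            by_contra hcon
            have hcon' : PySem.Set.contains vis r = false := by simpa using hcon
            apply hg
            rw [Bool.and_eq_true_iff]
            exact ⟨by rw [hcon']; rfl, (beq_iff_eq).2 hrv⟩
          exact List.mem_append_left _ (pvContains_iff.1 this)
        · exact h5 r hr hrv

-- extended measure lemma: appending several fresh keys
lemma pvFilterLen_append {keys : List (Int × Int)} (hnd : keys.Nodup) :
    ∀ (new vis : List (Int × Int)), new.Nodup → (∀ n ∈ new, n ∉ vis ∧ n ∈ keys) →
      (keys.filter (fun q => !PySem.Set.contains (vis ++ new) q)).length + new.length =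
        (keys.filter (fun q => !PySem.Set.contains vis q)).length := by
  intro new
  induction new with
  | nil => intro vis _ _; simp
  | cons n new ihn =>
    intro vis hNd hmem
    have hn := hmem n List.mem_cons_self
    have heq : vis ++ n :: new = (vis ++ [n]) ++ new := by simp
    have hstep : (keys.filter (fun q => !PySem.Set.contains (vis ++ [n]) q)).length + 1 =
        (keys.filter (fun q => !PySem.Set.contains vis q)).length := by
      have := pvFilterLen_add (keys := keys) (v := vis) (p := n) hnd hn.2 hn.1
      rw [PySem.Set.add_of_not_mem hn.1] at this
      exact this
    have hprops : ∀ m ∈ new, m ∉ vis ++ [n] ∧ m ∈ keys := by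
      intro m hm
      have hm' := hmem m (List.mem_cons_of_mem _ hm)
      refine ⟨fun hcon => ?_, hm'.2⟩
      rcases List.mem_append.1 hcon with h | h
      · exact hm'.1 h
      · exact (List.nodup_cons.1 hNd).1 ((List.mem_singleton.1 h) ▸ hm)
    have hrec := ihn (vis ++ [n]) (List.nodup_cons.1 hNd).2 hprops
    rw [heq]
    simp only [List.length_cons]
    omega

-- the while-loop master lemma
lemma pvFloodB_master (pl : PySem.Dict (Int × Int) Char) (hnd : pl.keys.Nodup)
    (plant : Char) (s : Int × Int) (v0 : List (Int × Int))
    (hs0 : s ∉ v0) (hsk : s ∈ pl.keys) (hplant : pl.get? s = some plant) :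
    ∀ (fuel : Nat) (vis stack pts : List (Int × Int)),
      (∀ q, q ∈ vis ↔ q ∈ v0 ∨ q ∈ stack ∨ q ∈ pts) →
      stack.Nodup → (∀ q ∈ stack, q ∉ pts) →
      (∀ q, (q ∈ stack ∨ q ∈ pts) → pvRA pl v0 s q) →
      (∀ q ∈ pts, ∀ r, pvAdj pl q r → r ∈ vis) →
      pts.Nodup → vis.Nodup →
      (pl.keys.filter (fun q => !PySem.Set.contains vis q)).length + stack.length < fuel →
      (∀ q, q ∈ (pvFloodB pl plant fuel (vis, stack, pts)).1 ↔
          q ∈ v0 ∨ q ∈ (pvFloodB pl plant fuel (vis, stack, pts)).2) ∧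
      (∀ q, (q ∈ pts ∨ q ∈ stack) → q ∈ (pvFloodB pl plant fuel (vis, stack, pts)).2) ∧
      (∀ q ∈ (pvFloodB pl plant fuel (vis, stack, pts)).2, pvRA pl v0 s q) ∧
      (∀ q ∈ (pvFloodB pl plant fuel (vis, stack, pts)).2, ∀ r, pvAdj pl q r →
          r ∈ (pvFloodB pl plant fuel (vis, stack, pts)).1) ∧
      (pvFloodB pl plant fuel (vis, stack, pts)).2.Nodup ∧
      (pvFloodB pl plant fuel (vis, stack, pts)).1.Nodup := by
  intro fuel
  induction fuel with
  | zero => intro vis stack pts _ _ _ _ _ _ _ hfuel; omega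
  | succ fuel ihf =>
    intro vis stack pts hvm hstNd hsp hra hcl hptsNd hvNd hfuel
    cases hlast : stack.getLast? with
    | none =>
      have hstack : stack = [] := List.getLast?_eq_none_iff.1 hlast
      subst hstack
      rw [pvFloodB_succ_none pl plant fuel vis [] pts hlast]
      refine ⟨?_, ?_, ?_, ?_, hptsNd, hvNd⟩
      · intro q; rw [hvm q]; simp
      · intro q hq; rcases hq with h | h
        · exact h
        · simp at h
      · intro q hq; exact hra q (Or.inr hq)
      · exact hcl
    | some p =>
      have hne : stack ≠ [] := by
        intro hcon; rw [hcon] at hlast; simp at hlast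
      have hstack : stack.dropLast ++ [p] = stack := by
        have hp : stack.getLast hne = p := by
          rw [List.getLast?_eq_some_getLast hne] at hlast
          exact Option.some_inj.1 hlast
        rw [← hp]
        exact List.dropLast_append_getLast hne
      have hpstack : p ∈ stack := by rw [← hstack]; simp
      have hrestsub : ∀ q ∈ stack.dropLast, q ∈ stack := by
        intro q hq; rw [← hstack]; exact List.mem_append_left _ hq
      have hpnotrest : p ∉ stack.dropLast := by
        intro hcon
        have hnd2 := hstNd
        rw [← hstack] at hnd2
        rcases List.nodup_append.1 hnd2 with ⟨_, _, hdisj⟩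
        exact hdisj p hcon p (by simp) rfl
      rw [pvFloodB_succ_some pl plant fuel vis stack pts p hlast]
      -- the push pass
      obtain ⟨new, e1, e2, enew, eprops, eclose⟩ :=
        pvPushB_fold pl plant (pvNbrs p) vis stack.dropLast
      rw [e1, e2]
      -- facts about p
      have hpRA : pvRA pl v0 s p := hra p (Or.inl hpstack)
      have hpplant : pl.get? p = some plant := by rw [pvRA_plant hpRA, hplant]
      have hpvis : p ∈ vis := (hvm p).2 (Or.inr (Or.inl hpstack))
      have hppts : p ∉ pts := hsp p hpstack
      have hnewRA : ∀ n ∈ new, pvRA pl v0 s n := by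
        intro n hn
        obtain ⟨hn1, hn2, hn3⟩ := eprops n hn
        have hnv0 : n ∉ v0 := fun hcon => hn1 ((hvm n).2 (Or.inl hcon))
        exact Relation.ReflTransGen.tail hpRA ⟨⟨hn2, plant, hpplant, hn3⟩, hnv0⟩
      have hnewkeys : ∀ n ∈ new, n ∈ pl.keys := by
        intro n hn
        by_contra hcon
        have := (PySem.Dict.get?_eq_none_iff_not_mem_keys pl n).2 hcon
        rw [(eprops n hn).2.2] at this
        simp at this
      -- new invariants
      have hvm' : ∀ q, q ∈ vis ++ new ↔
          q ∈ v0 ∨ q ∈ stack.dropLast ++ new ∨ q ∈ PySem.Set.add pts p := by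
        intro q
        constructor
        · intro hq
          rcases List.mem_append.1 hq with h | h
          · rcases (hvm q).1 h with h' | h' | h'
            · exact Or.inl h'
            · rw [← hstack] at h'
              rcases List.mem_append.1 h' with h'' | h''
              · exact Or.inr (Or.inl (List.mem_append_left _ h''))
              · exact Or.inr (Or.inr ((PySem.Set.mem_add pts p q).2
                  (Or.inr (List.mem_singleton.1 h''))))
            · exact Or.inr (Or.inr ((PySem.Set.mem_add pts p q).2 (Or.inl h')))
          · exact Or.inr (Or.inl (List.mem_append_right _ h))
        · intro hq
          rcases hq with h | h | h
          · exact List.mem_append_left _ ((hvm q).2 (Or.inl h))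
          · rcases List.mem_append.1 h with h' | h'
            · exact List.mem_append_left _ ((hvm q).2 (Or.inr (Or.inl (hrestsub q h'))))
            · exact List.mem_append_right _ h'
          · rcases (PySem.Set.mem_add pts p q).1 h with h' | rfl
            · exact List.mem_append_left _ ((hvm q).2 (Or.inr (Or.inr h')))
            · exact List.mem_append_left _ hpvis
      have hstNd' : (stack.dropLast ++ new).Nodup := by
        refine List.Nodup.append ?_ enew ?_
        · have hnd2 := hstNd
          rw [← hstack] at hnd2
          exact (List.nodup_append.1 hnd2).1
        · intro q hq hq'
          exact (eprops q hq').1 ((hvm q).2 (Or.inr (Or.inl (hrestsub q hq))))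
      have hsp' : ∀ q ∈ stack.dropLast ++ new, q ∉ PySem.Set.add pts p := by
        intro q hq hcon
        rcases (PySem.Set.mem_add pts p q).1 hcon with h | rfl
        · rcases List.mem_append.1 hq with h' | h'
          · exact hsp q (hrestsub q h') h
          · exact (eprops q h').1 ((hvm q).2 (Or.inr (Or.inr h)))
        · rcases List.mem_append.1 hq with h' | h'
          · exact hpnotrest h'
          · exact (eprops q h').1 hpvis
      have hra' : ∀ q, (q ∈ stack.dropLast ++ new ∨ q ∈ PySem.Set.add pts p) →
          pvRA pl v0 s q := by
        intro q hq
        rcases hq with h | h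
        · rcases List.mem_append.1 h with h' | h'
          · exact hra q (Or.inl (hrestsub q h'))
          · exact hnewRA q h'
        · rcases (PySem.Set.mem_add pts p q).1 h with h' | rfl
          · exact hra q (Or.inr h')
          · exact hpRA
      have hcl' : ∀ q ∈ PySem.Set.add pts p, ∀ r, pvAdj pl q r → r ∈ vis ++ new := by
        intro q hq r hadj
        rcases (PySem.Set.mem_add pts p q).1 hq with h | rfl
        · exact List.mem_append_left _ (hcl q h r hadj)
        · obtain ⟨hnbr, c, hc1, hc2⟩ := hadj
          have : pl.get? r = some plant := by
            rw [hc1] at hpplant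
            rw [hc2, Option.some_inj.1 hpplant]
          exact eclose r hnbr this
      have hptsNd' : (PySem.Set.add pts p).Nodup := PySem.Set.nodup_add pts p hptsNd
      have hvNd' : (vis ++ new).Nodup := by
        refine List.Nodup.append hvNd enew ?_
        intro q hq hq'
        exact (eprops q hq').1 hq
      have hfuel' : (pl.keys.filter (fun q => !PySem.Set.contains (vis ++ new) q)).length +
          (stack.dropLast ++ new).length < fuel := by
        have hm := pvFilterLen_append hnd new vis enew
          (fun n hn => ⟨(eprops n hn).1, hnewkeys n hn⟩)
        have hlen : stack.dropLast.length + 1 = stack.length := by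
          rw [← hstack]; simp
        rw [List.length_append]
        omega
      exact ihf (vis ++ new) (stack.dropLast ++ new) (PySem.Set.add pts p)
        hvm' hstNd' hsp' hra' hcl' hptsNd' hvNd' hfuel'
      |>.imp id (fun h2 => h2.imp (fun hC2 => fun q hq => hC2 q (by
          rcases hq with h | h
          · exact Or.inl ((PySem.Set.mem_add pts p q).2 (Or.inl h))
          · rw [← hstack] at h
            rcases List.mem_append.1 h with h' | h'
            · exact Or.inr (List.mem_append_left _ h')
            · exact Or.inl ((PySem.Set.mem_add pts p q).2
                (Or.inr (List.mem_singleton.1 h'))))) id)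

-- the usable characterisation of one flood fill
lemma pvFloodB_char (pl : PySem.Dict (Int × Int) Char) (hnd : pl.keys.Nodup)
    (plant : Char) (s : Int × Int) (v0 : List (Int × Int))
    (hs0 : s ∉ v0) (hsk : s ∈ pl.keys) (hplant : pl.get? s = some plant) (hv0Nd : v0.Nodup) :
    (∀ q, q ∈ (pvFloodB pl plant (pl.keys.length + 1)
        (PySem.Set.add v0 s, [s], (PySem.Set.empty : PySem.Set (Int × Int)))).2 ↔
          pvRA pl v0 s q) ∧
    (∀ q, q ∈ (pvFloodB pl plant (pl.keys.length + 1)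
        (PySem.Set.add v0 s, [s], (PySem.Set.empty : PySem.Set (Int × Int)))).1 ↔
          q ∈ v0 ∨ pvRA pl v0 s q) ∧
    (pvFloodB pl plant (pl.keys.length + 1)
        (PySem.Set.add v0 s, [s], (PySem.Set.empty : PySem.Set (Int × Int)))).2.Nodup ∧
    (pvFloodB pl plant (pl.keys.length + 1)
        (PySem.Set.add v0 s, [s], (PySem.Set.empty : PySem.Set (Int × Int)))).1.Nodup := by
  have hfuel : (pl.keys.filter (fun q =>
      !PySem.Set.contains (PySem.Set.add v0 s) q)).length + ([s] : List (Int × Int)).length <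
      pl.keys.length + 1 := by
    have h1 := pvFilterLen_add (keys := pl.keys) (v := v0) (p := s) hnd hsk hs0
    have h2 : (pl.keys.filter (fun q => !PySem.Set.contains v0 q)).length ≤ pl.keys.length :=
      List.length_filter_le _ _
    simp only [List.length_cons, List.length_nil]
    omega
  obtain ⟨c1, c2, c3, c4, c5, c6⟩ := pvFloodB_master pl hnd plant s v0 hs0 hsk hplant
    (pl.keys.length + 1) (PySem.Set.add v0 s) [s] PySem.Set.empty
    (by
      intro q
      rw [PySem.Set.mem_add]
      constructor
      · rintro (h | rfl)
        · exact Or.inl h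
        · exact Or.inr (Or.inl (by simp))
      · rintro (h | h | h)
        · exact Or.inl h
        · exact Or.inr (by simpa using h)
        · simp at h)
    (by simp) (by simp [PySem.Set.empty])
    (by
      intro q hq
      rcases hq with h | h
      · have : q = s := by simpa using h
        subst this
        exact Relation.ReflTransGen.refl
      · simp [PySem.Set.empty] at h)
    (by intro q hq; simp [PySem.Set.empty] at hq)
    (by simp [PySem.Set.empty]) (PySem.Set.nodup_add v0 s hv0Nd) hfuel
  have hptsiff : ∀ q, q ∈ (pvFloodB pl plant (pl.keys.length + 1)
      (PySem.Set.add v0 s, [s], (PySem.Set.empty : PySem.Set (Int × Int)))).2 ↔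
        pvRA pl v0 s q := by
    intro q
    constructor
    · exact c3 q
    · intro h
      have : q ∈ (pvFloodB pl plant (pl.keys.length + 1)
          (PySem.Set.add v0 s, [s], (PySem.Set.empty : PySem.Set (Int × Int)))).2 ∧ q ∉ v0 := by
        induction h with
        | refl => exact ⟨c2 s (Or.inr (by simp)), hs0⟩
        | tail _ hbc ihq =>
          obtain ⟨hadj, hbv⟩ := hbc
          have hb := c4 _ ihq.1 _ hadj
          rcases (c1 _).1 hb with h' | h'
          · exact absurd h' hbv
          · exact ⟨h', hbv⟩
      exact this.1
  refine ⟨hptsiff, ?_, c5, c6⟩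
  intro q
  rw [c1 q]
  rw [hptsiff q]

-- ---- the two ports build the same plant map ----

lemma pvPlants_eq (rows : List (List Char)) :
    (PySem.List.enumerate rows 0).foldl
      (fun d yrow =>
        (PySem.List.enumerate yrow.2 0).foldl (fun d xch => d.insert (xch.1, yrow.1) xch.2) d)
      PySem.Dict.empty = pvPlantsOfGridA rows := by
  unfold pvPlantsOfGridA
  rw [PySem.List.enumerate_eq_map_pyRange (d := ([] : List Char)), List.foldl_map]
  refine List.foldl_ext _ _ _ ?_
  intro d y _
  rw [PySem.List.enumerate_eq_map_pyRange (d := ' '), List.foldl_map]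

-- a fold of inserts keeps the keys Nodup
lemma pvFoldlKeysNodup {β : Type} (g : PySem.Dict (Int × Int) Char → β → PySem.Dict (Int × Int) Char)
    (hg : ∀ d b, d.keys.Nodup → (g d b).keys.Nodup) :
    ∀ (l : List β) (d : PySem.Dict (Int × Int) Char), d.keys.Nodup → (l.foldl g d).keys.Nodup := by
  intro l
  induction l with
  | nil => intro d hd; exact hd
  | cons b l ihl => intro d hd; exact ihl (g d b) (hg d b hd)

lemma pvPlantsKeysNodup (rows : List (List Char)) : (pvPlantsOfGridA rows).keys.Nodup := by
  unfold pvPlantsOfGridA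
  refine pvFoldlKeysNodup _ ?_ _ _ PySem.Dict.nodup_keys_empty
  intro d y hd
  exact PySem.Dict.nodup_keys_foldl_insert_key _ _ _ _ hd

-- ---- the two corner counts agree on equal point sets ----

lemma pvStepCorner (b1 b2 b3 : Bool) (acc : Int) :
    (if (!b1 && !b2) || (b1 && b2 && !b3) then acc + 1 else acc) =
      (if b1 && b2 then (if !b3 then acc + 1 else acc)
       else if !b1 && !b2 then acc + 1 else acc) := by
  cases b1 <;> cases b2 <;> cases b3 <;> simp

-- per-pair step functions, named
def pvStepAfun (pts : PySem.Set (Int × Int)) (p : Int × Int) (corners : Int)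
    (dd : (Int × Int) × (Int × Int)) : Int :=
  let firstIn := PySem.Set.contains pts (p.1 + dd.1.1, p.2 + dd.1.2)
  let secondIn := PySem.Set.contains pts (p.1 + dd.2.1, p.2 + dd.2.2)
  let isOutside := !firstIn && !secondIn
  let diagonal := (p.1 + dd.1.1 + dd.2.1, p.2 + dd.1.2 + dd.2.2)
  let isInside := firstIn && secondIn && !(PySem.Set.contains pts diagonal)
  if isOutside || isInside then corners + 1 else corners

def pvStepBfun (pts : PySem.Set (Int × Int)) (p : Int × Int) (corners : Int)
    (dd : (Int × Int) × (Int × Int)) : Int :=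
  let firstIn := PySem.Set.contains pts (p.1 + dd.1.1, p.2 + dd.1.2)
  let secondIn := PySem.Set.contains pts (p.1 + dd.2.1, p.2 + dd.2.2)
  if firstIn && secondIn then
    if !(PySem.Set.contains pts (p.1 + dd.1.1 + dd.2.1, p.2 + dd.1.2 + dd.2.2)) then
      corners + 1
    else corners
  else if !firstIn && !secondIn then corners + 1 else corners

lemma pvCountCornersA_eq_foldl (pts : PySem.Set (Int × Int)) :
    pvCountCornersA pts = pts.foldl (fun c p => pvPairsA.foldl (pvStepAfun pts p) c) 0 := rfl

lemma pvCountCornersB_eq_foldl (pts : PySem.Set (Int × Int)) :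
    pvCountCornersB pts = pts.foldl (fun c p => pvPairsA.foldl (pvStepBfun pts p) c) 0 := rfl

lemma pvStepAfun_shift (pts : PySem.Set (Int × Int)) (p : Int × Int) (acc : Int)
    (dd : (Int × Int) × (Int × Int)) :
    pvStepAfun pts p acc dd = acc + pvStepAfun pts p 0 dd := by
  simp only [pvStepAfun]
  split_ifs <;> omega

lemma pvStepBfun_shift (pts : PySem.Set (Int × Int)) (p : Int × Int) (acc : Int)
    (dd : (Int × Int) × (Int × Int)) :
    pvStepBfun pts p acc dd = acc + pvStepBfun pts p 0 dd := by
  simp only [pvStepBfun]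
  split_ifs <;> omega

-- a fold whose step shifts additively is an offset plus a sum
lemma pvFoldlSum {γ : Type} (f : Int → γ → Int) (hf : ∀ acc dd, f acc dd = acc + f 0 dd) :
    ∀ (l : List γ) (acc : Int), l.foldl f acc = acc + (l.map (fun x => f 0 x)).sum := by
  intro l
  induction l with
  | nil => intro acc; simp
  | cons x l ihl =>
    intro acc
    rw [List.foldl_cons, ihl (f acc x), hf acc x]
    simp only [List.map_cons, List.sum_cons]
    omega

lemma pvInnerA_shift (pts : PySem.Set (Int × Int)) (p : Int × Int) (acc : Int) :
    pvPairsA.foldl (pvStepAfun pts p) acc = acc + pvPairsA.foldl (pvStepAfun pts p) 0 := by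
  rw [pvFoldlSum _ (pvStepAfun_shift pts p) pvPairsA acc,
    pvFoldlSum _ (pvStepAfun_shift pts p) pvPairsA 0]
  omega

lemma pvInnerB_shift (pts : PySem.Set (Int × Int)) (p : Int × Int) (acc : Int) :
    pvPairsA.foldl (pvStepBfun pts p) acc = acc + pvPairsA.foldl (pvStepBfun pts p) 0 := by
  rw [pvFoldlSum _ (pvStepBfun_shift pts p) pvPairsA acc,
    pvFoldlSum _ (pvStepBfun_shift pts p) pvPairsA 0]
  omega

-- pointwise equality of the two inner loops over sets with the same members
lemma pvInner_eq (S T : PySem.Set (Int × Int)) (hiff : ∀ q, q ∈ S ↔ q ∈ T) (p : Int × Int)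
    (acc : Int) :
    pvPairsA.foldl (pvStepAfun S p) acc = pvPairsA.foldl (pvStepBfun T p) acc := by
  have hc : ∀ x, PySem.Set.contains S x = PySem.Set.contains T x := by
    intro x
    by_cases hx : x ∈ S
    · rw [pvContains_iff.2 hx, pvContains_iff.2 ((hiff x).1 hx)]
    · rw [pvContains_false_iff.2 hx, pvContains_false_iff.2 (fun h => hx ((hiff x).2 h))]
  refine List.foldl_ext _ _ _ ?_
  intro a dd _
  simp only [pvStepAfun, pvStepBfun, hc]
  exact pvStepCorner _ _ _ _

-- the headline lemma: same membership, both Nodup ⇒ same area-times-corners price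
lemma pvRegion_eq (S T : PySem.Set (Int × Int)) (hiff : ∀ q, q ∈ S ↔ q ∈ T)
    (hS : S.Nodup) (hT : T.Nodup) :
    PySem.Set.len S * pvCountCornersA S = PySem.Set.len T * pvCountCornersB T := by
  have hperm : S.Perm T := (List.perm_ext_iff_of_nodup hS hT).2 hiff
  have hlen : PySem.Set.len S = PySem.Set.len T := by
    simp only [PySem.Set.len]
    rw [hperm.length_eq]
  have hsum : pvCountCornersA S = pvCountCornersB T := by
    rw [pvCountCornersA_eq_foldl, pvCountCornersB_eq_foldl,
      pvFoldlSum _ (fun acc p => pvInnerA_shift S p acc) S 0,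
      pvFoldlSum _ (fun acc p => pvInnerB_shift T p acc) T 0]
    have hmapeq : S.map (fun p => pvPairsA.foldl (pvStepAfun S p) 0) =
        S.map (fun p => pvPairsA.foldl (pvStepBfun T p) 0) := by
      apply List.map_congr_left
      intro p _
      exact pvInner_eq S T hiff p 0
    rw [hmapeq]
    have hps := (hperm.map (fun p => pvPairsA.foldl (pvStepBfun T p) 0)).sum_eq
    omega
  rw [hlen, hsum]

-- ---- outer loops: A's region loop against B's key scan ----

def pvPriceA (r : Option Char × PySem.Set (Int × Int)) : Int :=
  PySem.Set.len r.2 * pvCountCornersA r.2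

-- B's outer fold body, named (definitionally the lambda in part2_alt)
def pvStepOuterB (pl : PySem.Dict (Int × Int) Char)
    (st : PySem.Set (Int × Int) × Int) (start : Int × Int) : PySem.Set (Int × Int) × Int :=
  if PySem.Set.contains st.1 start then st
  else
    let plant := (pl.get? start).getD ' '
    let vp := pvFloodB pl plant (pl.keys.length + 1)
      (PySem.Set.add st.1 start, [start], PySem.Set.empty)
    (vp.1, st.2 + PySem.Set.len vp.2 * pvCountCornersB vp.2)

lemma pvLoopA_nil (pl : PySem.Dict (Int × Int) Char) (fuel : Nat)
    (vis : PySem.Set (Int × Int)) (regs : List (Option Char × PySem.Set (Int × Int))) :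
    pvLoopA pl fuel vis [] regs = regs := by
  cases fuel <;> rfl

lemma pvLoopA_cons (pl : PySem.Dict (Int × Int) Char) (fuel : Nat)
    (vis : PySem.Set (Int × Int)) (k : Int × Int) (rest : List (Int × Int))
    (regs : List (Option Char × PySem.Set (Int × Int))) :
    pvLoopA pl (fuel + 1) vis (k :: rest) regs =
      pvLoopA pl fuel (pvDfsA pl (pl.keys.length + 1) k (vis, k :: rest, PySem.Set.empty)).1
        (pvDfsA pl (pl.keys.length + 1) k (vis, k :: rest, PySem.Set.empty)).2.1
        (regs ++ [(pl.get? k, (pvDfsA pl (pl.keys.length + 1) k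
          (vis, k :: rest, PySem.Set.empty)).2.2)]) := rfl

lemma pvRA_congr {pl : PySem.Dict (Int × Int) Char} {vA vB : List (Int × Int)} {s q : Int × Int}
    (hAB : ∀ x, x ∈ vA ↔ x ∈ vB) : pvRA pl vA s q ↔ pvRA pl vB s q :=
  ⟨pvRA_mono (fun x hx => (hAB x).2 hx), pvRA_mono (fun x hx => (hAB x).1 hx)⟩

lemma pvOuter_eq (pl : PySem.Dict (Int × Int) Char) (hnd : pl.keys.Nodup) :
    ∀ (ks : List (Int × Int)) (vA vB : List (Int × Int))
      (regs : List (Option Char × PySem.Set (Int × Int))) (tot : Int) (fuelA : Nat),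
      (∀ k ∈ ks, k ∈ pl.keys) → ks.Nodup →
      (∀ q ∈ vA, q ∈ pl.keys) → vA.Nodup → vB.Nodup →
      (∀ q, q ∈ vA ↔ q ∈ vB) →
      (ks.filter (fun q => !PySem.Set.contains vA q)).length ≤ fuelA →
      ((pvLoopA pl fuelA vA (ks.filter (fun q => !PySem.Set.contains vA q)) regs).map
          pvPriceA).sum
        = (regs.map pvPriceA).sum + ((ks.foldl (pvStepOuterB pl) (vB, tot)).2 - tot) := by
  intro ks
  induction ks with
  | nil =>
    intro vA vB regs tot fuelA _ _ _ _ _ _ _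
    simp only [List.filter_nil, List.foldl_nil]
    rw [pvLoopA_nil]
    omega
  | cons k ks ihk =>
    intro vA vB regs tot fuelA hksK hksNd hvK hvANd hvBNd hAB hfuelA
    by_cases hkvA : k ∈ vA
    · -- already assigned: A's queue never contained it, B skips it
      have hfk : (!PySem.Set.contains vA k) = false := by simpa using hkvA
      have hkvB : PySem.Set.contains vB k = true := pvContains_iff.2 ((hAB k).1 hkvA)
      have hstepB : pvStepOuterB pl (vB, tot) k = (vB, tot) := by
        simp only [pvStepOuterB, hkvB, if_true]
      rw [List.foldl_cons, hstepB]
      have hfilter : (k :: ks).filter (fun q => !PySem.Set.contains vA q) =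
          ks.filter (fun q => !PySem.Set.contains vA q) := by
        simp only [List.filter_cons, hfk, Bool.false_eq_true, if_false]
      rw [hfilter] at hfuelA ⊢
      exact ihk vA vB regs tot fuelA (fun x hx => hksK x (List.mem_cons_of_mem _ hx))
        (List.nodup_cons.1 hksNd).2 hvK hvANd hvBNd hAB hfuelA
    · -- a fresh region starts at k
      have hkk : k ∈ pl.keys := hksK k List.mem_cons_self
      have hkvB : k ∉ vB := fun h => hkvA ((hAB k).2 h)
      have hfk : (!PySem.Set.contains vA k) = true := by simpa using hkvA
      have hfilter : (k :: ks).filter (fun q => !PySem.Set.contains vA q) =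
          k :: ks.filter (fun q => !PySem.Set.contains vA q) := by
        simp only [List.filter_cons, hfk, if_true]
      rw [hfilter] at hfuelA ⊢
      cases fuelA with
      | zero => simp at hfuelA
      | succ fA =>
        obtain ⟨ck, hck⟩ : ∃ c, pl.get? k = some c := by
          cases h : pl.get? k with
          | none =>
            exact absurd ((PySem.Dict.get?_eq_none_iff_not_mem_keys _ _).1 h) (by simp [hkk])
          | some c => exact ⟨c, rfl⟩
        -- A: one dfs call
        have hrestK : ∀ q ∈ ks.filter (fun q => !PySem.Set.contains vA q), q ∈ pl.keys :=
          fun q hq => hksK q (List.mem_cons_of_mem _ (List.mem_filter.1 hq).1)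
        have hrestNotvA : ∀ q ∈ ks.filter (fun q => !PySem.Set.contains vA q), q ∉ vA :=
          fun q hq => pvContains_false_iff.1 (by simpa using (List.mem_filter.1 hq).2)
        have hqNd : (k :: ks.filter (fun q => !PySem.Set.contains vA q)).Nodup := by
          refine List.nodup_cons.2 ⟨?_, (List.nodup_cons.1 hksNd).2.filter _⟩
          intro hcon
          exact (List.nodup_cons.1 hksNd).1 (List.mem_filter.1 hcon).1
        have hqv : ∀ q ∈ k :: ks.filter (fun q => !PySem.Set.contains vA q), q ∉ vA := by
          intro q hq
          rcases List.mem_cons.1 hq with rfl | hq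
          · exact hkvA
          · exact hrestNotvA q hq
        have hfuelDfs : (pl.keys.filter (fun q => !PySem.Set.contains vA q)).length <
            pl.keys.length + 1 :=
          lt_of_le_of_lt (List.length_filter_le _ _) (by omega)
        obtain ⟨c1, c2, c3, c4, c5, c6⟩ := pvDfsA_char pl hnd (pl.keys.length + 1) k vA
          (k :: ks.filter (fun q => !PySem.Set.contains vA q)) PySem.Set.empty
          hvK hvANd (by simp [PySem.Set.empty]) hqNd hqv hkk hkvA hfuelDfs
        -- B: one flood fill
        obtain ⟨d1, d2, d3, d4⟩ := pvFloodB_char pl hnd ck k vB hkvB hkk hck hvBNd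
        have hstepB : pvStepOuterB pl (vB, tot) k =
            ((pvFloodB pl ck (pl.keys.length + 1)
                (PySem.Set.add vB k, [k], PySem.Set.empty)).1,
             tot + PySem.Set.len (pvFloodB pl ck (pl.keys.length + 1)
                (PySem.Set.add vB k, [k], PySem.Set.empty)).2 *
              pvCountCornersB (pvFloodB pl ck (pl.keys.length + 1)
                (PySem.Set.add vB k, [k], PySem.Set.empty)).2) := by
          have hkvB' : PySem.Set.contains vB k = false := pvContains_false_iff.2 hkvB
          simp only [pvStepOuterB, hkvB', Bool.false_eq_true, if_false, hck, Option.getD_some]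
        -- abbreviations
        set stA := pvDfsA pl (pl.keys.length + 1) k
          (vA, k :: ks.filter (fun q => !PySem.Set.contains vA q), PySem.Set.empty) with hstA
        set outB := pvFloodB pl ck (pl.keys.length + 1)
          (PySem.Set.add vB k, [k], PySem.Set.empty) with houtB
        -- the two fresh regions have the same members
        have hregiff : ∀ q, q ∈ stA.2.2 ↔ q ∈ outB.2 := by
          intro q
          rw [c2 q, d1 q]
          constructor
          · rintro (h | h)
            · simp [PySem.Set.empty] at h
            · exact (pvRA_congr hAB).1 h
          · intro h
            exact Or.inr ((pvRA_congr hAB).2 h)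
        have hprice : pvPriceA (pl.get? k, stA.2.2) =
            PySem.Set.len outB.2 * pvCountCornersB outB.2 := by
          unfold pvPriceA
          exact pvRegion_eq stA.2.2 outB.2 hregiff c6 d3
        -- the new visited sets have the same members
        have hAB' : ∀ q, q ∈ stA.1 ↔ q ∈ outB.1 := by
          intro q
          rw [c1 q, d2 q]
          constructor
          · rintro (h | h)
            · exact Or.inl ((hAB q).1 h)
            · exact Or.inr ((pvRA_congr hAB).1 h)
          · rintro (h | h)
            · exact Or.inl ((hAB q).2 h)
            · exact Or.inr ((pvRA_congr hAB).2 h)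
        -- A's queue after the call, in suffix-filter form
        have hmono : ∀ x ∈ vA, x ∈ stA.1 := fun x hx => (c1 x).2 (Or.inl hx)
        have hkin : k ∈ stA.1 := (c1 k).2 (Or.inr Relation.ReflTransGen.refl)
        have hqueue : stA.2.1 = ks.filter (fun q => !PySem.Set.contains stA.1 q) := by
          rw [c3]
          have hfk2 : (!PySem.Set.contains stA.1 k) = false := by simpa using hkin
          simp only [List.filter_cons, hfk2, Bool.false_eq_true, if_false]
          exact pvFilter_filter_absorb hmono
        have hfuelA' : (ks.filter (fun q => !PySem.Set.contains stA.1 q)).length ≤ fA := by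
          have h1 := pvFilterLen_mono (keys := ks) hmono
          have h2 : ((k :: ks.filter (fun q => !PySem.Set.contains vA q)).length) ≤ fA + 1 :=
            hfuelA
          simp only [List.length_cons] at h2
          have h3 : (ks.filter (fun q => !PySem.Set.contains vA q)).length ≤ fA := by omega
          omega
        -- one step of each side, then the induction hypothesis
        rw [pvLoopA_cons, ← hstA, hqueue, List.foldl_cons, hstepB]
        have hIH := ihk stA.1 outB.1 (regs ++ [(pl.get? k, stA.2.2)])
          (tot + PySem.Set.len outB.2 * pvCountCornersB outB.2) fA
          (fun x hx => hksK x (List.mem_cons_of_mem _ hx)) (List.nodup_cons.1 hksNd).2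
          c4 c5 d4 hAB' hfuelA'
        rw [hIH]
        simp only [List.map_append, List.sum_append, List.map_cons, List.map_nil,
          List.sum_cons, List.sum_nil]
        rw [hprice]
        omega

-- ---- final assembly ----

lemma part2_eq_loop (text : String) :
    part2 text =
      ((pvLoopA (pvPlantsOfGridA (PySem.Chars.splitOn text.toList ['\n']))
          (pvPlantsOfGridA (PySem.Chars.splitOn text.toList ['\n'])).keys.length
          PySem.Set.empty
          (pvPlantsOfGridA (PySem.Chars.splitOn text.toList ['\n'])).keys []).map
        pvPriceA).sum := rfl

lemma part2_alt_eq_fold (text : String) :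
    part2_alt text =
      ((pvPlantsOfGridA (PySem.Chars.splitOn text.toList ['\n'])).keys.foldl
        (pvStepOuterB (pvPlantsOfGridA (PySem.Chars.splitOn text.toList ['\n'])))
        (PySem.Set.empty, 0)).2 := by
  show (((PySem.List.enumerate (PySem.Chars.splitOn text.toList ['\n']) 0).foldl
      (fun d yrow =>
        (PySem.List.enumerate yrow.2 0).foldl (fun d xch => d.insert (xch.1, yrow.1) xch.2) d)
      PySem.Dict.empty).keys.foldl
        (pvStepOuterB ((PySem.List.enumerate (PySem.Chars.splitOn text.toList ['\n']) 0).foldl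
          (fun d yrow =>
            (PySem.List.enumerate yrow.2 0).foldl
              (fun d xch => d.insert (xch.1, yrow.1) xch.2) d)
          PySem.Dict.empty))
        (PySem.Set.empty, 0)).2 = _
  rw [pvPlants_eq]

lemma part2_main (text : String) : part2 text = part2_alt text := by
  rw [part2_eq_loop, part2_alt_eq_fold]
  have hnd := pvPlantsKeysNodup (PySem.Chars.splitOn text.toList ['\n'])
  have hfilter : (pvPlantsOfGridA (PySem.Chars.splitOn text.toList ['\n'])).keys.filter
      (fun q => !PySem.Set.contains PySem.Set.empty q) =
      (pvPlantsOfGridA (PySem.Chars.splitOn text.toList ['\n'])).keys := by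
    apply List.filter_eq_self.2
    intro x _
    rfl
  have h0 := pvOuter_eq (pvPlantsOfGridA (PySem.Chars.splitOn text.toList ['\n'])) hnd
    (pvPlantsOfGridA (PySem.Chars.splitOn text.toList ['\n'])).keys
    PySem.Set.empty PySem.Set.empty [] 0
    (pvPlantsOfGridA (PySem.Chars.splitOn text.toList ['\n'])).keys.length
    (fun k hk => hk) hnd
    (by intro q hq; simp [PySem.Set.empty] at hq)
    (by simp [PySem.Set.empty]) (by simp [PySem.Set.empty]) (fun q => Iff.rfl)
    (by rw [hfilter])
  rw [hfilter] at h0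
  rw [h0]
  simp



-- ===== VERDICT (by name: the statement is the Claim_ definition above) =====
theorem part2_spec : Claim_equal_part2 := by
  intro text _hdom
  unfold Spec_part2
  exact part2_main text
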